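-- pv_equiv track=rewrite | github.com/ShaharEli/algoTrain | 2018B/2018B.py | check_pwds
-- ===== SOURCE A (Python) =====
-- def check_pwds(req_list, pwd_list):
--     lst = []
--     for pwd in pwd_list:
--         valid = True
--         for req in req_list:
--             valid2 = False
--             for i in req:
--                 if i in pwd:
--                     valid2 = True
--                     break
--             if not valid2:
--                 valid = False
--                 break
--
--         if valid:
--             lst.append(pwd)
--     return lst
-- ===== SOURCE B (Python) =====
-- def check_pwds(req_list, pwd_list):
--     candidates = pwd_list
--     for req in req_list:
--         s = set(req)
--         candidates = [p for p in candidates if not s.isdisjoint(p)]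
--     return candidates
-- ===== Notes on version B (the rewrite author's own statement) =====
-- stated objective: alternative
-- what changed: Inverts the loop nesting: instead of per-password boolean flags with breaks over all requirements, B runs a requirement-outer successive-filtering pipeline that shrinks one candidate list per requirement.
import Mathlib
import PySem

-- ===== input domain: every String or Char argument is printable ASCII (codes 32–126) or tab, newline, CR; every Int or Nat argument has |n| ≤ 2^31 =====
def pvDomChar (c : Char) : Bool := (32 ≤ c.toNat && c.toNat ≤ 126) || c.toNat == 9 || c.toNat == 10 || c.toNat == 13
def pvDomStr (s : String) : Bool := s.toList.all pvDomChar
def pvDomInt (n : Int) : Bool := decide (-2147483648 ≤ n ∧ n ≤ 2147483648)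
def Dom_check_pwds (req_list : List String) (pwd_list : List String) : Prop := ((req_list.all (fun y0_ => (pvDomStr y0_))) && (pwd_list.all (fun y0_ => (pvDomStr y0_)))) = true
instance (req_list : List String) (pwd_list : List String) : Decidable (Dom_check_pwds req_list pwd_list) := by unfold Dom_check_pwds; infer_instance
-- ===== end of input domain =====

-- B rewrites A's per-password flag-and-break scan as a requirement-outer successive-filtering
-- pipeline over a shrinking candidate list; same results, same order (alternative decomposition).

-- ===== PORT A =====
-- inner loop 'for i in req: if i in pwd: valid2 = True; break' (a 1-char 'i in pwd' is char membership)
def pvAnyA (pwd : String) : List Char → Bool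
  | [] => false
  | i :: rest => if i ∈ pwd.toList then true else pvAnyA pwd rest

-- middle loop 'for req in req_list: … if not valid2: valid = False; break'
def pvValidA (pwd : String) : List String → Bool
  | [] => true
  | req :: rest => if !(pvAnyA pwd req.toList) then false else pvValidA pwd rest

-- outer loop 'for pwd in pwd_list: … if valid: lst.append(pwd)'
def pvLoopA (req_list : List String) (lst : List String) : List String → List String
  | [] => lst
  | pwd :: rest =>
      if pvValidA pwd req_list then pvLoopA req_list (lst ++ [pwd]) rest
      else pvLoopA req_list lst rest

def check_pwds (req_list : List String) (pwd_list : List String) : List String :=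
  pvLoopA req_list [] pwd_list

-- ===== PORT B =====
-- 'not s.isdisjoint(p)' (s = set(req)) is: some char of p lies in s
def check_pwds_alt (req_list : List String) (pwd_list : List String) : List String :=
  req_list.foldl
    (fun candidates req =>
      let s := PySem.Set.ofList req.toList
      candidates.filter (fun p => p.toList.any (fun ch => s.contains ch)))
    pwd_list

-- ===== PRECONDITION & SPEC =====
def Spec_check_pwds (req_list : List String) (pwd_list : List String) (out : List String) : Prop := out = check_pwds_alt req_list pwd_list
instance (req_list : List String) (pwd_list : List String) (out : List String) : Decidable (Spec_check_pwds req_list pwd_list out) := by unfold Spec_check_pwds; infer_instance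

-- ===== CLAIM (what is proved, stated in full; the proofs are below) =====
def Claim_equal_check_pwds : Prop := ∀ (req_list : List String) (pwd_list : List String), Dom_check_pwds req_list pwd_list → Spec_check_pwds req_list pwd_list (check_pwds req_list pwd_list)

-- ===== LEMMAS AND PROOFS =====
theorem pvAnyA_eq (pwd : String) (cs : List Char) :
    pvAnyA pwd cs = cs.any (fun ch => ch ∈ pwd.toList) := by
  induction cs with
  | nil => rfl
  | cons c rest ih => by_cases h : c ∈ pwd.toList <;> simp [pvAnyA, ih, h]

theorem pvValidA_eq (pwd : String) (reqs : List String) :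
    pvValidA pwd reqs = reqs.all (fun req => req.toList.any (fun ch => ch ∈ pwd.toList)) := by
  induction reqs with
  | nil => rfl
  | cons r rest ih =>
      simp only [pvValidA, pvAnyA_eq, List.all_cons, ih]
      by_cases h : r.toList.any (fun ch => ch ∈ pwd.toList) <;> simp [h]

theorem pvLoopA_eq (req_list : List String) (lst : List String) (pwds : List String) :
    pvLoopA req_list lst pwds = lst ++ pwds.filter (fun pwd => pvValidA pwd req_list) := by
  induction pwds generalizing lst with
  | nil => simp [pvLoopA]
  | cons p rest ih =>
      simp only [pvLoopA, List.filter_cons]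
      by_cases h : pvValidA p req_list <;> simp [h, ih]

theorem any_swap (req p : List Char) :
    p.any (fun ch => PySem.Set.contains (PySem.Set.ofList req) ch)
      = req.any (fun ch => ch ∈ p) := by
  rw [Bool.eq_iff_iff]
  simp only [List.any_eq_true, PySem.Set.contains_iff, PySem.Set.mem_ofList, decide_eq_true_eq]
  exact ⟨fun ⟨c, hp, hr⟩ => ⟨c, hr, hp⟩, fun ⟨c, hr, hp⟩ => ⟨c, hp, hr⟩⟩

theorem foldl_filter_eq (reqs : List String) (cand : List String) :
    reqs.foldl
      (fun candidates req =>
        let s := PySem.Set.ofList req.toList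
        candidates.filter (fun p => p.toList.any (fun ch => s.contains ch)))
      cand
    = cand.filter (fun p => reqs.all (fun req => req.toList.any (fun ch => ch ∈ p.toList))) := by
  induction reqs generalizing cand with
  | nil => simp
  | cons r rest ih =>
      simp only [List.foldl_cons, ih, List.filter_filter, List.all_cons]
      apply List.filter_congr
      intro p _
      rw [any_swap]
      by_cases h : r.toList.any (fun ch => ch ∈ p.toList) <;> simp [h]

-- ===== VERDICT (by name: the statement is the Claim_ definition above) =====
theorem check_pwds_spec : Claim_equal_check_pwds := by
  intro req_list pwd_list _
  show check_pwds req_list pwd_list = check_pwds_alt req_list pwd_list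
  simp only [check_pwds, check_pwds_alt, pvLoopA_eq, foldl_filter_eq, List.nil_append]
  apply List.filter_congr
  intro p _
  simp [pvValidA_eq]
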